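-- pv_equiv track=rewrite | github.com/ricardojnf/cell-clustering | aux_functions.py | count_metrics
-- ===== SOURCE A (Python) =====
-- def count_metrics(true_labels, pred_labels):
--     tp = 0
--     fp = 0
--     tn = 0
--     fn = 0
--
--     for i in range(len(true_labels)):
--         for j in range(i+1,len(true_labels)):
--             if true_labels[i] == true_labels[j] and pred_labels[i] == pred_labels[j]:
--                 tp += 1
--             if true_labels[i] != true_labels[j] and pred_labels[i] != pred_labels[j]:
--                 tn += 1
--             if true_labels[i] != true_labels[j] and pred_labels[i] == pred_labels[j]:
--                 fp += 1
--             if true_labels[i] == true_labels[j] and pred_labels[i] != pred_labels[j]: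
--                 fn += 1
--
--     return tp, fp, tn, fn
-- ===== SOURCE B (Python) =====
-- def count_metrics(true_labels, pred_labels):
--     # Contingency-table pair counting: one pass builds joint and marginal
--     # tallies; pair counts follow from C(c,2) sums in O(n) instead of O(n^2).
--     joint = {}
--     tc = {}
--     pc = {}
--     for a, b in zip(true_labels, pred_labels):
--         joint[(a, b)] = joint.get((a, b), 0) + 1
--         tc[a] = tc.get(a, 0) + 1
--         pc[b] = pc.get(b, 0) + 1
--
--     def c2(c):
--         return c * (c - 1) // 2
--
--     n = len(true_labels)
--     tp = sum(c2(c) for c in joint.values())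
--     fn = sum(c2(c) for c in tc.values()) - tp
--     fp = sum(c2(c) for c in pc.values()) - tp
--     tn = c2(n) - tp - fp - fn
--     return tp, fp, tn, fn
-- ===== Notes on version B (the rewrite author's own statement) =====
-- stated objective: faster
-- what changed: Replaces the O(n^2) double loop over index pairs by a single pass building joint and marginal label tallies, recovering tp/fp/tn/fn from sums of C(count,2) over the contingency table.
import Mathlib
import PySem

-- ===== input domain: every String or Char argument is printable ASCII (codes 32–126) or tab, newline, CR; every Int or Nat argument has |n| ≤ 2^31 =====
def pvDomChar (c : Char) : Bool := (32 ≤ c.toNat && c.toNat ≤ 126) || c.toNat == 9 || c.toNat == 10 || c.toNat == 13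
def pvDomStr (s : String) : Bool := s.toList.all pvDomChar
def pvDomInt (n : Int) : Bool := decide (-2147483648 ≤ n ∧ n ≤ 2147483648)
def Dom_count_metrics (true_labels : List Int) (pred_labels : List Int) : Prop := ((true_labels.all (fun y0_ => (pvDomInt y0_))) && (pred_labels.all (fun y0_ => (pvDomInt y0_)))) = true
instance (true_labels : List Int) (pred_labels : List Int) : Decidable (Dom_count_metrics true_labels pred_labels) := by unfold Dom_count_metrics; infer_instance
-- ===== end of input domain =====

-- B replaces A's O(n^2) double loop over index pairs by a single pass building
-- joint and marginal label tallies and summing C(count,2) over them (objective: faster).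

-- ===== PORT A =====
-- Literal port of A's nested index loops; state s = (tp, fp, tn, fn), updated in
-- the Python's branch order (tp, tn, fp, fn). Indexing via pyGet?; within Pre_
-- every index read is in range, so .getD 0 never supplies a value.
def count_metrics (true_labels : List Int) (pred_labels : List Int) : List Int :=
  let n : Int := true_labels.length
  let r :=
    (PySem.List.pyRange 0 n 1).foldl (fun (s : Int × Int × Int × Int) i =>
      (PySem.List.pyRange (i+1) n 1).foldl (fun (s : Int × Int × Int × Int) j =>
        let ti := (PySem.List.pyGet? true_labels i).getD 0
        let tj := (PySem.List.pyGet? true_labels j).getD 0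
        let pi := (PySem.List.pyGet? pred_labels i).getD 0
        let pj := (PySem.List.pyGet? pred_labels j).getD 0
        let s := if ti = tj ∧ pi = pj then (s.1 + 1, s.2.1, s.2.2.1, s.2.2.2) else s
        let s := if ti ≠ tj ∧ pi ≠ pj then (s.1, s.2.1, s.2.2.1 + 1, s.2.2.2) else s
        let s := if ti ≠ tj ∧ pi = pj then (s.1, s.2.1 + 1, s.2.2.1, s.2.2.2) else s
        let s := if ti = tj ∧ pi ≠ pj then (s.1, s.2.1, s.2.2.1, s.2.2.2 + 1) else s
        s) s) ((0, 0, 0, 0) : Int × Int × Int × Int)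
  [r.1, r.2.1, r.2.2.1, r.2.2.2]

-- ===== PORT B =====
-- helper of Source B: c2(c) = c * (c - 1) // 2
def pyC2 (c : Int) : Int := PySem.Int.floordiv (c * (c - 1)) 2

-- Port of Source B: one pass over zip(true_labels, pred_labels) building the three
-- tallies (joint, tc, pc) exactly as the Python loop does, then the C(c,2) sums.
def count_metrics_alt (true_labels : List Int) (pred_labels : List Int) : List Int :=
  let zs := true_labels.zip pred_labels
  let cs := zs.foldl
    (fun (s : PySem.Dict (Int × Int) Int × PySem.Dict Int Int × PySem.Dict Int Int) z =>
      (s.1.insert z (s.1.getD z 0 + 1),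
       s.2.1.insert z.1 (s.2.1.getD z.1 0 + 1),
       s.2.2.insert z.2 (s.2.2.getD z.2 0 + 1)))
    (PySem.Dict.empty, PySem.Dict.empty, PySem.Dict.empty)
  let n : Int := true_labels.length
  let tp := (cs.1.values.map pyC2).sum
  let fn := (cs.2.1.values.map pyC2).sum - tp
  let fp := (cs.2.2.values.map pyC2).sum - tp
  let tn := pyC2 n - tp - fp - fn
  [tp, fp, tn, fn]

-- ===== PRECONDITION & SPEC =====
-- Pre_ excludes exactly the inputs where A raises IndexError: pred_labels shorter
-- than true_labels (the loops read pred_labels[j] for every j < len(true_labels)).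
def Pre_count_metrics (true_labels : List Int) (pred_labels : List Int) : Prop :=
  true_labels.length ≤ pred_labels.length
instance (true_labels : List Int) (pred_labels : List Int) : Decidable (Pre_count_metrics true_labels pred_labels) := by unfold Pre_count_metrics; infer_instance

def pvWitness_count_metrics : List Int × List Int := ([1, 2, 1, 2], [1, 1, 2, 1])

def Spec_count_metrics (true_labels : List Int) (pred_labels : List Int) (out : List Int) : Prop := out = count_metrics_alt true_labels pred_labels
instance (true_labels : List Int) (pred_labels : List Int) (out : List Int) : Decidable (Spec_count_metrics true_labels pred_labels out) := by unfold Spec_count_metrics; infer_instance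

-- ===== CLAIM (what is proved, stated in full; the proofs are below) =====
def Claim_equal_count_metrics : Prop := ∀ (true_labels : List Int) (pred_labels : List Int), Dom_count_metrics true_labels pred_labels → Pre_count_metrics true_labels pred_labels → Spec_count_metrics true_labels pred_labels (count_metrics true_labels pred_labels)

-- ===== LEMMAS AND PROOFS =====

-- the pair of labels A reads at index i
def pvVal (t p : List Int) (i : Int) : Int × Int :=
  ((PySem.List.pyGet? t i).getD 0, (PySem.List.pyGet? p i).getD 0)

-- number of index pairs i < j holding equal values
def eqPairs {α : Type} [BEq α] : List α → Int
  | [] => 0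
  | x :: r => (r.count x : Int) + eqPairs r

-- generic pair accumulator: sum of g over all (earlier, later) element pairs
def cntQ (g : (Int × Int) → (Int × Int) → Int) : List (Int × Int) → Int
  | [] => 0
  | z :: r => (r.map (g z)).sum + cntQ g r

def gTP (z w : Int × Int) : Int := if z.1 = w.1 ∧ z.2 = w.2 then 1 else 0
def gFP (z w : Int × Int) : Int := if z.1 ≠ w.1 ∧ z.2 = w.2 then 1 else 0
def gTN (z w : Int × Int) : Int := if z.1 ≠ w.1 ∧ z.2 ≠ w.2 then 1 else 0
def gFN (z w : Int × Int) : Int := if z.1 = w.1 ∧ z.2 ≠ w.2 then 1 else 0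

-- A's double sum over index pairs, for an arbitrary pair weight g
def dsum (t p : List Int) (g : (Int × Int) → (Int × Int) → Int) : Int :=
  ((PySem.List.pyRange 0 ↑t.length 1).map (fun i =>
    ((PySem.List.pyRange (i+1) ↑t.length 1).map (fun j =>
      g (pvVal t p i) (pvVal t p j))).sum)).sum

lemma pyC2_succ (c : Int) : pyC2 (c + 1) = pyC2 c + c := by
  unfold pyC2
  rw [PySem.Int.floordiv_eq_ediv_of_pos (by norm_num),
      PySem.Int.floordiv_eq_ediv_of_pos (by norm_num),
      show (c + 1) * (c + 1 - 1) = c * (c - 1) + c * 2 by ring,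
      Int.add_mul_ediv_right _ _ (by norm_num : (2:Int) ≠ 0)]

lemma pyGet?_cons_succ {α : Type} (x : α) (xs : List α) (j : Int) (h : 0 ≤ j) :
    PySem.List.pyGet? (x :: xs) (j + 1) = PySem.List.pyGet? xs j := by
  obtain ⟨k, rfl⟩ : ∃ k : Nat, (k : Int) = j := ⟨j.toNat, Int.toNat_of_nonneg h⟩
  simp only [PySem.List.pyGet?, PySem.List.pyIdx?, List.length_cons]
  split_ifs <;> try omega
  · rw [show ((k:Int) + 1).toNat = k + 1 by omega]
    simp
  · rfl

lemma pyRange_shift (a b : Int) :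
    PySem.List.pyRange (a + 1) (b + 1) 1 = (PySem.List.pyRange a b 1).map (· + 1) := by
  simp only [PySem.List.pyRange]
  norm_num
  intro k _
  ring

lemma pvVal_cons_zero (x y : Int) (t p : List Int) :
    pvVal (x :: t) (y :: p) 0 = (x, y) := by
  simp [pvVal, PySem.List.pyGet?, PySem.List.pyIdx?]

lemma pvVal_cons_succ (x y : Int) (t p : List Int) (j : Int) (h : 0 ≤ j) :
    pvVal (x :: t) (y :: p) (j + 1) = pvVal t p j := by
  simp [pvVal, pyGet?_cons_succ _ _ _ h]

lemma zipval (t : List Int) : ∀ (p : List Int), t.length ≤ p.length →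
    (PySem.List.pyRange 0 ↑t.length 1).map (pvVal t p) = t.zip p := by
  induction t with
  | nil => intro p h; simp [PySem.List.pyRange]
  | cons x t ih =>
    intro p h
    match p with
    | [] => simp at h
    | y :: p =>
      have h' : t.length ≤ p.length := by simpa using h
      have hlen : ((x :: t).length : Int) = (t.length : Int) + 1 := by
        push_cast [List.length_cons]; ring
      rw [hlen, PySem.List.pyRange_one_cons (by omega : (0:Int) < ↑t.length + 1)]
      have hs : PySem.List.pyRange (0 + 1) ((t.length : Int) + 1) 1
          = (PySem.List.pyRange 0 ↑t.length 1).map (· + 1) := by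
        simpa using pyRange_shift 0 ↑t.length
      rw [hs, List.map_cons, List.map_map, pvVal_cons_zero, List.zip_cons_cons]
      congr 1
      rw [show (pvVal (x :: t) (y :: p) ∘ (· + 1)) = fun j => pvVal (x :: t) (y :: p) (j + 1) from rfl]
      rw [List.map_congr_left (fun j hj => pvVal_cons_succ x y t p j
        ((PySem.List.mem_pyRange_one.mp hj).1)), ih p h']

lemma dsum_eq (g : (Int × Int) → (Int × Int) → Int) (t : List Int) :
    ∀ (p : List Int), t.length ≤ p.length → dsum t p g = cntQ g (t.zip p) := by
  induction t with
  | nil => intro p h; simp [dsum, cntQ, PySem.List.pyRange]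
  | cons x t ih =>
    intro p h
    match p with
    | [] => simp at h
    | y :: p =>
      have h' : t.length ≤ p.length := by simpa using h
      have hlen : ((x :: t).length : Int) = (t.length : Int) + 1 := by
        push_cast [List.length_cons]; ring
      simp only [dsum]
      rw [hlen, PySem.List.pyRange_one_cons (by omega : (0:Int) < (t.length : Int) + 1)]
      have hs : PySem.List.pyRange (0 + 1) ((t.length : Int) + 1) 1
          = (PySem.List.pyRange 0 ↑t.length 1).map (· + 1) := by
        simpa using pyRange_shift 0 ↑t.length
      rw [List.map_cons, List.sum_cons, hs, List.zip_cons_cons]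
      simp only [cntQ]
      congr 1
      · rw [List.map_map]
        rw [List.map_congr_left (l := PySem.List.pyRange 0 ↑t.length 1)
          (g := fun j => g (x, y) (pvVal t p j)) (fun j hj => by
            have h0 : (0:Int) ≤ j := (PySem.List.mem_pyRange_one.mp hj).1
            show g (pvVal (x::t) (y::p) 0) (pvVal (x::t) (y::p) (j+1)) = g (x,y) (pvVal t p j)
            rw [pvVal_cons_zero, pvVal_cons_succ _ _ _ _ _ h0])]
        rw [← zipval t p h', List.map_map]
        rfl
      · rw [List.map_map]
        rw [List.map_congr_left (l := PySem.List.pyRange 0 ↑t.length 1)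
          (g := fun i => ((PySem.List.pyRange (i+1) ↑t.length 1).map (fun j =>
            g (pvVal t p i) (pvVal t p j))).sum) (fun i hi => by
            have h0 : (0:Int) ≤ i := (PySem.List.mem_pyRange_one.mp hi).1
            show ((PySem.List.pyRange (i+1+1) ((t.length:Int)+1) 1).map (fun j =>
              g (pvVal (x::t) (y::p) (i+1)) (pvVal (x::t) (y::p) j))).sum = _
            rw [pyRange_shift (i+1) ↑t.length, List.map_map]
            rw [List.map_congr_left (fun j hj => by
              have hj0 : (0:Int) ≤ j := le_trans (by omega) (PySem.List.mem_pyRange_one.mp hj).1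
              show g (pvVal (x::t) (y::p) (i+1)) (pvVal (x::t) (y::p) (j+1))
                = g (pvVal t p i) (pvVal t p j)
              rw [pvVal_cons_succ _ _ _ _ _ h0, pvVal_cons_succ _ _ _ _ _ hj0])])]
        have := ih p h'
        simp only [dsum] at this
        exact this

lemma step4 (a b c d : Int) (s : Int × Int × Int × Int) :
    (let s := if a = b ∧ c = d then (s.1 + 1, s.2.1, s.2.2.1, s.2.2.2) else s
     let s := if a ≠ b ∧ c ≠ d then (s.1, s.2.1, s.2.2.1 + 1, s.2.2.2) else s
     let s := if a ≠ b ∧ c = d then (s.1, s.2.1 + 1, s.2.2.1, s.2.2.2) else s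
     let s := if a = b ∧ c ≠ d then (s.1, s.2.1, s.2.2.1, s.2.2.2 + 1) else s
     s)
    = (s.1 + gTP (a, c) (b, d), s.2.1 + gFP (a, c) (b, d),
       s.2.2.1 + gTN (a, c) (b, d), s.2.2.2 + gFN (a, c) (b, d)) := by
  by_cases h1 : a = b <;> by_cases h2 : c = d <;>
    simp [gTP, gFP, gTN, gFN, h1, h2]

lemma A_eq_dsum (t p : List Int) :
    count_metrics t p = [dsum t p gTP, dsum t p gFP, dsum t p gTN, dsum t p gFN] := by
  have hinner : ∀ (i : Int) (s : Int × Int × Int × Int),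
      (PySem.List.pyRange (i+1) ↑t.length 1).foldl (fun (s : Int × Int × Int × Int) j =>
        let ti := (PySem.List.pyGet? t i).getD 0
        let tj := (PySem.List.pyGet? t j).getD 0
        let pi := (PySem.List.pyGet? p i).getD 0
        let pj := (PySem.List.pyGet? p j).getD 0
        let s := if ti = tj ∧ pi = pj then (s.1 + 1, s.2.1, s.2.2.1, s.2.2.2) else s
        let s := if ti ≠ tj ∧ pi ≠ pj then (s.1, s.2.1, s.2.2.1 + 1, s.2.2.2) else s
        let s := if ti ≠ tj ∧ pi = pj then (s.1, s.2.1 + 1, s.2.2.1, s.2.2.2) else s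
        let s := if ti = tj ∧ pi ≠ pj then (s.1, s.2.1, s.2.2.1, s.2.2.2 + 1) else s
        s) s
      = (s.1 + ((PySem.List.pyRange (i+1) ↑t.length 1).map (fun j => gTP (pvVal t p i) (pvVal t p j))).sum,
         s.2.1 + ((PySem.List.pyRange (i+1) ↑t.length 1).map (fun j => gFP (pvVal t p i) (pvVal t p j))).sum,
         s.2.2.1 + ((PySem.List.pyRange (i+1) ↑t.length 1).map (fun j => gTN (pvVal t p i) (pvVal t p j))).sum,
         s.2.2.2 + ((PySem.List.pyRange (i+1) ↑t.length 1).map (fun j => gFN (pvVal t p i) (pvVal t p j))).sum) := by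
    intro i s
    rw [PySem.List.foldl_congr_mem _ _
      (fun (s : Int × Int × Int × Int) j =>
        (s.1 + gTP (pvVal t p i) (pvVal t p j), s.2.1 + gFP (pvVal t p i) (pvVal t p j),
         s.2.2.1 + gTN (pvVal t p i) (pvVal t p j), s.2.2.2 + gFN (pvVal t p i) (pvVal t p j))) s
      (fun acc x _ => step4 _ _ _ _ acc)]
    rw [PySem.List.foldl_prod_mk
        (f := fun (a : Int) j => a + gTP (pvVal t p i) (pvVal t p j))
        (g := fun (s : Int × Int × Int) j =>
          (s.1 + gFP (pvVal t p i) (pvVal t p j), s.2.1 + gTN (pvVal t p i) (pvVal t p j),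
           s.2.2 + gFN (pvVal t p i) (pvVal t p j)))]
    rw [PySem.List.foldl_prod_mk
        (f := fun (a : Int) j => a + gFP (pvVal t p i) (pvVal t p j))
        (g := fun (s : Int × Int) j =>
          (s.1 + gTN (pvVal t p i) (pvVal t p j), s.2 + gFN (pvVal t p i) (pvVal t p j)))]
    rw [PySem.List.foldl_prod_mk
        (f := fun (a : Int) j => a + gTN (pvVal t p i) (pvVal t p j))
        (g := fun (a : Int) j => a + gFN (pvVal t p i) (pvVal t p j))]
    rw [PySem.List.foldl_add, PySem.List.foldl_add, PySem.List.foldl_add, PySem.List.foldl_add]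
  unfold count_metrics
  dsimp only
  rw [PySem.List.foldl_congr_mem _ _
    (fun (s : Int × Int × Int × Int) i =>
      (s.1 + ((PySem.List.pyRange (i+1) ↑t.length 1).map (fun j => gTP (pvVal t p i) (pvVal t p j))).sum,
       s.2.1 + ((PySem.List.pyRange (i+1) ↑t.length 1).map (fun j => gFP (pvVal t p i) (pvVal t p j))).sum,
       s.2.2.1 + ((PySem.List.pyRange (i+1) ↑t.length 1).map (fun j => gTN (pvVal t p i) (pvVal t p j))).sum,
       s.2.2.2 + ((PySem.List.pyRange (i+1) ↑t.length 1).map (fun j => gFN (pvVal t p i) (pvVal t p j))).sum))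
    ((0,0,0,0) : Int × Int × Int × Int)
    (fun acc i _ => hinner i acc)]
  rw [PySem.List.foldl_prod_mk
      (f := fun (a : Int) i => a + ((PySem.List.pyRange (i+1) ↑t.length 1).map (fun j => gTP (pvVal t p i) (pvVal t p j))).sum)
      (g := fun (s : Int × Int × Int) i =>
        (s.1 + ((PySem.List.pyRange (i+1) ↑t.length 1).map (fun j => gFP (pvVal t p i) (pvVal t p j))).sum,
         s.2.1 + ((PySem.List.pyRange (i+1) ↑t.length 1).map (fun j => gTN (pvVal t p i) (pvVal t p j))).sum,
         s.2.2 + ((PySem.List.pyRange (i+1) ↑t.length 1).map (fun j => gFN (pvVal t p i) (pvVal t p j))).sum))]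
  rw [PySem.List.foldl_prod_mk
      (f := fun (a : Int) i => a + ((PySem.List.pyRange (i+1) ↑t.length 1).map (fun j => gFP (pvVal t p i) (pvVal t p j))).sum)
      (g := fun (s : Int × Int) i =>
        (s.1 + ((PySem.List.pyRange (i+1) ↑t.length 1).map (fun j => gTN (pvVal t p i) (pvVal t p j))).sum,
         s.2 + ((PySem.List.pyRange (i+1) ↑t.length 1).map (fun j => gFN (pvVal t p i) (pvVal t p j))).sum))]
  rw [PySem.List.foldl_prod_mk
      (f := fun (a : Int) i => a + ((PySem.List.pyRange (i+1) ↑t.length 1).map (fun j => gTN (pvVal t p i) (pvVal t p j))).sum)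
      (g := fun (a : Int) i => a + ((PySem.List.pyRange (i+1) ↑t.length 1).map (fun j => gFN (pvVal t p i) (pvVal t p j))).sum)]
  rw [PySem.List.foldl_add, PySem.List.foldl_add, PySem.List.foldl_add, PySem.List.foldl_add]
  simp only [dsum, zero_add]

lemma sum_ite_eq_count {α : Type} [BEq α] [LawfulBEq α] [DecidableEq α] (v : α) (r : List α) :
    (r.map (fun b => if v = b then (1:Int) else 0)).sum = (r.count v : Int) := by
  induction r with
  | nil => simp
  | cons b r ih =>
    simp only [List.map_cons, List.sum_cons, ih, List.count_cons]
    by_cases h : v = b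
    · simp [h]; ring
    · have : (b == v) = false := by simp [Ne.symm h]
      simp [h, this]

lemma cntQ_tp (zs : List (Int × Int)) : cntQ gTP zs = eqPairs zs := by
  induction zs with
  | nil => rfl
  | cons z r ih =>
    simp only [cntQ, eqPairs, ih]
    congr 1
    rw [← sum_ite_eq_count z r]
    refine congrArg List.sum (List.map_congr_left ?_)
    intro b _
    simp only [gTP, Prod.ext_iff]

lemma cntQ_tp_fn (zs : List (Int × Int)) :
    cntQ gTP zs + cntQ gFN zs = eqPairs (zs.map Prod.fst) := by
  induction zs with
  | nil => rfl
  | cons z r ih =>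
    simp only [cntQ, eqPairs, List.map_cons]
    rw [show (List.map (gTP z) r).sum + cntQ gTP r + ((List.map (gFN z) r).sum + cntQ gFN r)
        = ((List.map (gTP z) r).sum + (List.map (gFN z) r).sum) + (cntQ gTP r + cntQ gFN r) by ring,
      ih, ← PySem.List.sum_map_add_int]
    congr 1
    rw [← sum_ite_eq_count z.1 (r.map Prod.fst), List.map_map]
    refine congrArg List.sum (List.map_congr_left ?_)
    intro b _
    simp only [gTP, gFN, Function.comp]
    by_cases h1 : z.1 = b.1 <;> by_cases h2 : z.2 = b.2 <;> simp [h1, h2]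

lemma cntQ_tp_fp (zs : List (Int × Int)) :
    cntQ gTP zs + cntQ gFP zs = eqPairs (zs.map Prod.snd) := by
  induction zs with
  | nil => rfl
  | cons z r ih =>
    simp only [cntQ, eqPairs, List.map_cons]
    rw [show (List.map (gTP z) r).sum + cntQ gTP r + ((List.map (gFP z) r).sum + cntQ gFP r)
        = ((List.map (gTP z) r).sum + (List.map (gFP z) r).sum) + (cntQ gTP r + cntQ gFP r) by ring,
      ih, ← PySem.List.sum_map_add_int]
    congr 1
    rw [← sum_ite_eq_count z.2 (r.map Prod.snd), List.map_map]
    refine congrArg List.sum (List.map_congr_left ?_)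
    intro b _
    simp only [gTP, gFP, Function.comp]
    by_cases h1 : z.1 = b.1 <;> by_cases h2 : z.2 = b.2 <;> simp [h1, h2]

lemma cntQ_total (zs : List (Int × Int)) :
    cntQ gTP zs + cntQ gFP zs + cntQ gTN zs + cntQ gFN zs = pyC2 ↑zs.length := by
  induction zs with
  | nil => rfl
  | cons z r ih =>
    simp only [cntQ, List.length_cons]
    have hone : ∀ b : Int × Int, gTP z b + gFP z b + gTN z b + gFN z b = 1 := by
      intro b
      simp only [gTP, gFP, gTN, gFN]
      by_cases h1 : z.1 = b.1 <;> by_cases h2 : z.2 = b.2 <;> simp [h1, h2]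
    have hsum : (List.map (gTP z) r).sum + (List.map (gFP z) r).sum
        + (List.map (gTN z) r).sum + (List.map (gFN z) r).sum = (r.length : Int) := by
      rw [← PySem.List.sum_map_add_int, ← PySem.List.sum_map_add_int, ← PySem.List.sum_map_add_int]
      rw [show (List.map (fun x => gTP z x + gFP z x + gTN z x + gFN z x) r)
          = List.map (fun _ => (1:Int)) r from List.map_congr_left (fun b _ => hone b)]
      rw [PySem.List.sum_map_const_int]; ring
    have hc : ((r.length + 1 : Nat) : Int) = (r.length : Int) + 1 := by push_cast; ring
    rw [hc, pyC2_succ]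
    linarith

lemma sum_step {α : Type} [BEq α] [LawfulBEq α] (S : List α) (hnd : S.Nodup)
    (x : α) (hx : x ∈ S) (r : List α) :
    (S.map (fun k => pyC2 ↑(List.count k (x :: r)))).sum
      = (S.map (fun k => pyC2 ↑(List.count k r))).sum + ↑(List.count x r) := by
  obtain ⟨S₁, S₂, rfl⟩ := List.append_of_mem hx
  have hnd' := List.nodup_append.mp hnd
  have hx1 : x ∉ S₁ := fun h => hnd'.2.2 x h x (List.mem_cons_self ..) rfl
  have hx2 : x ∉ S₂ := (List.nodup_cons.mp hnd'.2.1).1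
  have hcongr : ∀ (L : List α), x ∉ L →
      L.map (fun k => pyC2 ↑(List.count k (x :: r))) = L.map (fun k => pyC2 ↑(List.count k r)) := by
    intro L hL
    refine List.map_congr_left (fun k hk => ?_)
    have : (x == k) = false := by
      simp only [beq_eq_false_iff_ne]; rintro rfl; exact hL hk
    rw [List.count_cons, this]
    simp
  simp only [List.map_append, List.sum_append, List.map_cons, List.sum_cons,
    hcongr S₁ hx1, hcongr S₂ hx2]
  rw [List.count_cons, beq_self_eq_true]
  simp only [if_true]
  push_cast
  rw [pyC2_succ]
  ring

lemma sum_over {α : Type} [BEq α] [LawfulBEq α] (S : List α) :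
    ∀ (r : List α), (∀ v ∈ r, v ∈ S) → S.Nodup →
      (S.map (fun k => pyC2 ↑(List.count k r))).sum = eqPairs r := by
  intro r
  induction r with
  | nil =>
    intro _ _
    simp only [List.count_nil, eqPairs]
    rw [show (fun k : α => pyC2 ↑(0:Nat)) = fun _ : α => (0:Int) from funext (fun _ => rfl)]
    rw [PySem.List.sum_map_const_int]; ring
  | cons x r ih =>
    intro hmem hnd
    rw [sum_step S hnd x (hmem x (List.mem_cons_self ..)) r,
      ih (fun v hv => hmem v (List.mem_cons_of_mem _ hv)) hnd]
    simp only [eqPairs]; ring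

lemma sumC2_counter {α : Type} [BEq α] [LawfulBEq α] (xs : List α) :
    (((PySem.Dict.counter xs).values).map pyC2).sum = eqPairs xs := by
  have hv : (PySem.Dict.counter xs).values
      = (PySem.Set.ofList xs).map (fun k => ((List.count k xs : Nat) : Int)) := by
    show ((PySem.Dict.counter xs).items).map _ = _
    rw [PySem.Dict.items_counter, List.map_map]
    rfl
  rw [hv, List.map_map]
  exact sum_over (PySem.Set.ofList xs) xs
    (fun v hv => (PySem.Set.mem_ofList xs v).mpr hv) (PySem.Set.nodup_ofList xs)

lemma B_char (t p : List Int) :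
    count_metrics_alt t p =
      [eqPairs (t.zip p),
       eqPairs ((t.zip p).map Prod.snd) - eqPairs (t.zip p),
       pyC2 ↑t.length - eqPairs (t.zip p)
         - (eqPairs ((t.zip p).map Prod.snd) - eqPairs (t.zip p))
         - (eqPairs ((t.zip p).map Prod.fst) - eqPairs (t.zip p)),
       eqPairs ((t.zip p).map Prod.fst) - eqPairs (t.zip p)] := by
  unfold count_metrics_alt
  dsimp only
  rw [PySem.List.foldl_prod_mk
      (f := fun (d : PySem.Dict (Int × Int) Int) z => d.insert z (d.getD z 0 + 1))
      (g := fun (s : PySem.Dict Int Int × PySem.Dict Int Int) (z : Int × Int) =>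
        (s.1.insert z.1 (s.1.getD z.1 0 + 1), s.2.insert z.2 (s.2.getD z.2 0 + 1)))]
  rw [PySem.List.foldl_prod_mk
      (f := fun (d : PySem.Dict Int Int) (z : Int × Int) => d.insert z.1 (d.getD z.1 0 + 1))
      (g := fun (d : PySem.Dict Int Int) (z : Int × Int) => d.insert z.2 (d.getD z.2 0 + 1))]
  rw [show (t.zip p).foldl (fun (d : PySem.Dict Int Int) (z : Int × Int) =>
        d.insert z.1 (d.getD z.1 0 + 1)) PySem.Dict.empty
      = ((t.zip p).map Prod.fst).foldl (fun d x => d.insert x (d.getD x 0 + 1)) PySem.Dict.empty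
      from (List.foldl_map (f := Prod.fst)
        (g := fun (d : PySem.Dict Int Int) (x : Int) => d.insert x (d.getD x 0 + 1))
        (l := t.zip p) (init := PySem.Dict.empty)).symm]
  rw [show (t.zip p).foldl (fun (d : PySem.Dict Int Int) (z : Int × Int) =>
        d.insert z.2 (d.getD z.2 0 + 1)) PySem.Dict.empty
      = ((t.zip p).map Prod.snd).foldl (fun d x => d.insert x (d.getD x 0 + 1)) PySem.Dict.empty
      from (List.foldl_map (f := Prod.snd)
        (g := fun (d : PySem.Dict Int Int) (x : Int) => d.insert x (d.getD x 0 + 1))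
        (l := t.zip p) (init := PySem.Dict.empty)).symm]
  rw [PySem.Dict.foldl_insert_getD_add_one_eq_counter,
      PySem.Dict.foldl_insert_getD_add_one_eq_counter,
      PySem.Dict.foldl_insert_getD_add_one_eq_counter]
  rw [sumC2_counter, sumC2_counter, sumC2_counter]

-- ===== VERDICT (by name: the statement is the Claim_ definition above) =====
theorem count_metrics_spec : Claim_equal_count_metrics := by
  intro t p _ hpre
  unfold Pre_count_metrics at hpre
  unfold Spec_count_metrics
  rw [A_eq_dsum, B_char, dsum_eq _ _ _ hpre, dsum_eq _ _ _ hpre, dsum_eq _ _ _ hpre,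
      dsum_eq _ _ _ hpre]
  have h1 := cntQ_tp (t.zip p)
  have h2 := cntQ_tp_fn (t.zip p)
  have h3 := cntQ_tp_fp (t.zip p)
  have h4 := cntQ_total (t.zip p)
  have hlen : ((t.zip p).length : Int) = (t.length : Int) := by
    rw [List.length_zip]; omega
  rw [hlen] at h4
  simp only [List.cons.injEq, and_true]
  exact ⟨by linarith, by linarith, by linarith, by linarith⟩
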